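-- pv_equiv track=rewrite | github.com/uziahmd/p_difficulty_code | e2h_eval/scripts/variant_analysis.py | analyze_failure_modes
-- ===== SOURCE A (Python) =====
-- def analyze_failure_modes(results):
--     """Analyze failure modes for a set of results."""
--     if not results:
--         return {"correct": 0, "incorrect": 0, "compilation_error": 0}
--
--     scores = [r['score'] for r in results]
--     return {
--         "correct": sum(1 for s in scores if s == 1),
--         "incorrect": sum(1 for s in scores if s == 0),
--         "compilation_error": sum(1 for s in scores if s == -1)
--     }
-- ===== SOURCE B (Python) =====
-- def analyze_failure_modes(results):
--     """Analyze failure modes for a set of results."""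
--     counts = {"correct": 0, "incorrect": 0, "compilation_error": 0}
--     for r in results:
--         s = r['score']
--         if s == 1:
--             counts["correct"] += 1
--         elif s == 0:
--             counts["incorrect"] += 1
--         elif s == -1:
--             counts["compilation_error"] += 1
--     return counts
-- ===== Notes on version B (the rewrite author's own statement) =====
-- stated objective: simpler
-- what changed: Replaced the empty-list guard plus three separate comprehension scans of the score list with a single classifying pass that bumps one of three pre-zeroed counters per result.
import Mathlib
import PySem

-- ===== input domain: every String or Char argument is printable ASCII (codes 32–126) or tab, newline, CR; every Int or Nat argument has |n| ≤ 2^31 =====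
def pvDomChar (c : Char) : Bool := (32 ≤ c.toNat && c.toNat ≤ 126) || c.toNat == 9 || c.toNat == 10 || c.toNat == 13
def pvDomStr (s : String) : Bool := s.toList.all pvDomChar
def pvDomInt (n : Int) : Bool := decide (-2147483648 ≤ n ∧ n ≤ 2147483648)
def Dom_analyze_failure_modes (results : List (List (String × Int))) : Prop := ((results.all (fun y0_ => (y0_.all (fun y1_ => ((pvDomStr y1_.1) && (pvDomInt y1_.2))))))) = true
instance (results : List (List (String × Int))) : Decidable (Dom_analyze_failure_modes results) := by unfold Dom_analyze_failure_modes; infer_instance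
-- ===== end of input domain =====

-- B replaces the empty-list guard and three comprehension scans with one classifying pass over three zeroed counters (simpler; same value wherever A returns).


-- r['score'] : first matching value (the getD 0 default is only reached outside Pre_, where Python raises KeyError)
def pvScore (r : List (String × Int)) : Int := ((PySem.Dict.mk r).get? "score").getD 0

-- ===== PORT A =====
def analyze_failure_modes (results : List (List (String × Int))) : List (String × Int) :=
  if results = [] then [("correct", 0), ("incorrect", 0), ("compilation_error", 0)]
  else
    let scores := results.map pvScore
    [("correct", scores.foldl (fun acc s => if s = 1 then acc + 1 else acc) 0),
     ("incorrect", scores.foldl (fun acc s => if s = 0 then acc + 1 else acc) 0),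
     ("compilation_error", scores.foldl (fun acc s => if s = -1 then acc + 1 else acc) 0)]

-- ===== PORT B =====
def pvStepB (counts : PySem.Dict String Int) (r : List (String × Int)) : PySem.Dict String Int :=
  let s := pvScore r
  if s = 1 then counts.modify "correct" 0 (· + 1)
  else if s = 0 then counts.modify "incorrect" 0 (· + 1)
  else if s = -1 then counts.modify "compilation_error" 0 (· + 1)
  else counts

def analyze_failure_modes_alt (results : List (List (String × Int))) : List (String × Int) :=
  (results.foldl pvStepB
    (PySem.Dict.ofList [("correct", 0), ("incorrect", 0), ("compilation_error", 0)])).items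

-- ===== PRECONDITION & SPEC =====
-- Pre_ excludes results containing a dict without key 'score', on which A raises KeyError (B raises there too).
def Pre_analyze_failure_modes (results : List (List (String × Int))) : Prop :=
  (results.all (fun r => r.any (fun p => p.1 == "score"))) = true
instance (results : List (List (String × Int))) : Decidable (Pre_analyze_failure_modes results) := by unfold Pre_analyze_failure_modes; infer_instance

def pvWitness_analyze_failure_modes : (List (List (String × Int))) := [[("score", 1)], [("score", -1)], [("score", 7)]]

def Spec_analyze_failure_modes (results : List (List (String × Int))) (out : List (String × Int)) : Prop := out = analyze_failure_modes_alt results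
instance (results : List (List (String × Int))) (out : List (String × Int)) : Decidable (Spec_analyze_failure_modes results out) := by unfold Spec_analyze_failure_modes; infer_instance

-- ===== CLAIM (what is proved, stated in full; the proofs are below) =====
def Claim_equal_analyze_failure_modes : Prop := ∀ (results : List (List (String × Int))), Dom_analyze_failure_modes results → Pre_analyze_failure_modes results → Spec_analyze_failure_modes results (analyze_failure_modes results)

-- ===== LEMMAS AND PROOFS =====

lemma countA_shift (l : List Int) (v : Int) (n : Int) :
    l.foldl (fun acc s => if s = v then acc + 1 else acc) n
      = n + l.foldl (fun acc s => if s = v then acc + 1 else acc) 0 := by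
  induction l generalizing n with
  | nil => simp
  | cons x xs ih =>
    simp only [List.foldl_cons]
    rw [ih, ih (if x = v then 0 + 1 else 0)]
    split_ifs <;> ring

lemma mod_correct (a b c : Int) :
    (PySem.Dict.mk [("correct", a), ("incorrect", b), ("compilation_error", c)]).modify "correct" 0 (· + 1)
      = PySem.Dict.mk [("correct", a + 1), ("incorrect", b), ("compilation_error", c)] := by
  simp [PySem.Dict.modify, PySem.Dict.insert, PySem.Dict.getD, PySem.Dict.get?, PySem.Dict.contains]

lemma mod_incorrect (a b c : Int) :
    (PySem.Dict.mk [("correct", a), ("incorrect", b), ("compilation_error", c)]).modify "incorrect" 0 (· + 1)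
      = PySem.Dict.mk [("correct", a), ("incorrect", b + 1), ("compilation_error", c)] := by
  simp [PySem.Dict.modify, PySem.Dict.insert, PySem.Dict.getD, PySem.Dict.get?, PySem.Dict.contains]

lemma mod_compile (a b c : Int) :
    (PySem.Dict.mk [("correct", a), ("incorrect", b), ("compilation_error", c)]).modify "compilation_error" 0 (· + 1)
      = PySem.Dict.mk [("correct", a), ("incorrect", b), ("compilation_error", c + 1)] := by
  simp [PySem.Dict.modify, PySem.Dict.insert, PySem.Dict.getD, PySem.Dict.get?, PySem.Dict.contains]

-- B's fold from the explicit three-key dict, characterised by A's three counters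
lemma foldB_items (results : List (List (String × Int))) (a b c : Int) :
    (results.foldl pvStepB (PySem.Dict.mk [("correct", a), ("incorrect", b), ("compilation_error", c)])).items
      = [("correct", a + (results.map pvScore).foldl (fun acc s => if s = 1 then acc + 1 else acc) 0),
         ("incorrect", b + (results.map pvScore).foldl (fun acc s => if s = 0 then acc + 1 else acc) 0),
         ("compilation_error", c + (results.map pvScore).foldl (fun acc s => if s = -1 then acc + 1 else acc) 0)] := by
  induction results generalizing a b c with
  | nil => simp
  | cons r rs ih =>
    simp only [List.foldl_cons, List.map_cons, pvStepB]
    rw [countA_shift _ 1, countA_shift _ 0, countA_shift _ (-1)]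
    by_cases h1 : pvScore r = 1
    · rw [if_pos h1, mod_correct, ih]
      simp [h1]; ring
    · rw [if_neg h1]
      by_cases h0 : pvScore r = 0
      · rw [if_pos h0, mod_incorrect, ih]
        simp [h0]; ring
      · rw [if_neg h0]
        by_cases hm : pvScore r = -1
        · rw [if_pos hm, mod_compile, ih]
          simp [hm]; ring
        · rw [if_neg hm, ih]
          simp [h1, h0, hm]

-- ===== VERDICT (by name: the statement is the Claim_ definition above) =====
theorem analyze_failure_modes_spec : Claim_equal_analyze_failure_modes := by
  intro results _ _
  show _ = _
  unfold analyze_failure_modes analyze_failure_modes_alt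
  rw [show PySem.Dict.ofList [("correct", (0:Int)), ("incorrect", 0), ("compilation_error", 0)]
      = PySem.Dict.mk [("correct", 0), ("incorrect", 0), ("compilation_error", 0)] from by decide]
  rw [foldB_items]
  cases results with
  | nil => simp
  | cons r rs => simp
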